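-- pv_equiv track=rewrite | github.com/olafbrandt/hackerrank | factorial-array/fa.py | factb
-- ===== SOURCE A (Python) =====
-- factDict = {}
--
-- def factb(x):
--     if x not in factDict:
--         if (x > 40):
--             return 0
--         if x < 2:
--             factDict[x] = 1
--         else:
--             factDict[x] = (x * factb(x-1)) % 10**9
--     return factDict[x]
-- ===== SOURCE B (Python) =====
-- def factb(x):
--     if x > 40:
--         return 0
--     result = 1
--     i = x
--     while i >= 2:
--         result = (i * result) % 10**9
--         i -= 1
--     return result
-- ===== Notes on version B (the rewrite author's own statement) =====
-- stated objective: simpler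
-- what changed: Replaces the memoized recursion with a plain decrementing while-loop accumulating the modular product; the memo dict (hidden global state) is dropped since it never changes the return value.
import Mathlib
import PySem

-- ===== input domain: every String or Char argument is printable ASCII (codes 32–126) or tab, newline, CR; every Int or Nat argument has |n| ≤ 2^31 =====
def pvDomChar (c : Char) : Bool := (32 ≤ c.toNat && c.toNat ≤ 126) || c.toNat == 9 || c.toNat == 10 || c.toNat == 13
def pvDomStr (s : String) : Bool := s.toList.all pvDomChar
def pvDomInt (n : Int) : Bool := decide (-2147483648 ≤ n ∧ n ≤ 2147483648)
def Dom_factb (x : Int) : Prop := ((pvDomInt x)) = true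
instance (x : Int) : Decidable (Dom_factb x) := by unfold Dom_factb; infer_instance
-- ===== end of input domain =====

-- B replaces A's memoized recursion by a plain decrementing while-loop (the memo
-- only affects hidden global state, not the return value). Equivalence is about
-- the RETURN value; A also mutates the module-level dict factDict, B does not.

-- ===== PORT A =====
-- literal port of A's recursion; the memo dict is pure caching (write-then-read
-- of the value just computed), so each call returns exactly this recursion's value.
def factb (x : Int) : Int :=
  if x > 40 then 0
  else if x < 2 then 1
  else PySem.Int.mod (x * factb (x - 1)) (10 ^ 9)
termination_by x.toNat
decreasing_by omega

-- ===== PORT B =====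
-- while i >= 2: result = (i * result) % 10**9; i -= 1
def factbLoop (i result : Int) : Int :=
  if i ≥ 2 then factbLoop (i - 1) (PySem.Int.mod (i * result) (10 ^ 9)) else result
termination_by i.toNat
decreasing_by omega

def factb_alt (x : Int) : Int :=
  if x > 40 then 0 else factbLoop x 1

-- ===== PRECONDITION & SPEC =====
def Spec_factb (x : Int) (out : Int) : Prop := out = factb_alt x
instance (x : Int) (out : Int) : Decidable (Spec_factb x out) := by unfold Spec_factb; infer_instance

-- ===== CLAIM (what is proved, stated in full; the proofs are below) =====
def Claim_equal_factb : Prop := ∀ (x : Int), Dom_factb x → Spec_factb x (factb x)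

-- ===== LEMMAS AND PROOFS =====

-- the mathematical product 2*3*…*x (1 for x < 2)
def pfact (x : Int) : Int :=
  if x < 2 then 1 else x * pfact (x - 1)
termination_by x.toNat
decreasing_by omega

theorem pfact_lt_two {x : Int} (h : x < 2) : pfact x = 1 := by
  rw [pfact]; simp [h]

theorem factb_eq_pfact_mod {x : Int} (h : ¬ x > 40) :
    factb x = PySem.Int.mod (pfact x) (10 ^ 9) := by
  by_cases h2 : x < 2
  · rw [factb, pfact]; simp [h, h2]
  · rw [factb, pfact]
    simp only [h, if_false, h2, if_false]
    have ih := factb_eq_pfact_mod (x := x - 1) (by omega)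
    rw [ih]
    simp only [PySem.Int.mod_eq_emod_of_pos (show (0:Int) < 10 ^ 9 by norm_num)]
    conv_lhs => rw [Int.mul_emod, Int.emod_emod_of_dvd _ dvd_rfl]
    conv_rhs => rw [Int.mul_emod]
termination_by x.toNat
decreasing_by omega

theorem factbLoop_eq {i : Int} (r : Int) (h : 2 ≤ i) :
    factbLoop i r = PySem.Int.mod (pfact i * r) (10 ^ 9) := by
  by_cases h2 : 2 ≤ i - 1
  · rw [factbLoop]
    simp only [ge_iff_le, h, if_pos]
    rw [factbLoop_eq _ h2]
    conv_rhs => rw [pfact, if_neg (show ¬ i < 2 by omega)]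
    simp only [PySem.Int.mod_eq_emod_of_pos (show (0:Int) < 10 ^ 9 by norm_num)]
    conv_lhs => rw [Int.mul_emod, Int.emod_emod_of_dvd _ dvd_rfl, ← Int.mul_emod]
    rw [show pfact (i - 1) * (i * r) = i * pfact (i - 1) * r by ring]
  · have hi : i = 2 := by omega
    subst hi
    rw [factbLoop]
    simp only [ge_iff_le, le_refl, if_pos, show (2:Int) - 1 = 1 from rfl]
    rw [factbLoop]
    norm_num [pfact, pfact_lt_two, PySem.Int.mod_eq_emod_of_pos]
termination_by i.toNat
decreasing_by omega

-- ===== VERDICT (by name: the statement is the Claim_ definition above) =====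
theorem factb_spec : Claim_equal_factb := by
  intro x _
  unfold Spec_factb factb_alt
  by_cases h40 : x > 40
  · rw [factb]; simp [h40]
  · simp only [h40, if_false]
    by_cases h2 : x < 2
    · rw [factb, factbLoop]
      simp [h40, h2, show ¬ x ≥ 2 by omega]
    · rw [factb_eq_pfact_mod h40, factbLoop_eq 1 (by omega), mul_one]
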